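-- pv_equiv track=rewrite | github.com/S0jer/algorithms-and-data-structures-course-2021 | ASD/Powtórka przed kolokwium/2016_17_zad_2.py | goodThief
-- ===== SOURCE A (Python) =====
-- def goodThief(A):
--     n = len(A)
--     dp = [0 for _ in range(n)]
--     road = []
--
--     dp[0] = A[0]
--     dp[1] = A[1]
--
--     for i in range(2, n):
--         dp[i] = max(A[i] + dp[j] for j in range(i - 1))
--
--     result = max(dp)
--     check = result
--
--     for i in range(n - 1, -1, -1):
--         if dp[i] == check:
--             road.append(i)
--             check -= A[i]
--     road = road[::-1]
--
--     return road, result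
-- ===== SOURCE B (Python) =====
-- def goodThief(A):
--     # O(n): running prefix maximum of dp[0..i-2] replaces A's inner max loop.
--     n = len(A)
--     dp = [A[0], A[1]]
--     best = dp[0]
--     for i in range(2, n):
--         dp.append(A[i] + best)
--         if dp[i - 1] > best:
--             best = dp[i - 1]
--     result = max(dp)
--     check = result
--     road = []
--     for i in range(n - 1, -1, -1):
--         if dp[i] == check:
--             road = [i] + road
--             check -= A[i]
--     return road, result
-- ===== Notes on version B (the rewrite author's own statement) =====
-- stated objective: faster
-- what changed: the O(n) inner 'max(A[i]+dp[j] for j in range(i-1))' scan is replaced by a running prefix maximum of dp carried through one pass (and the road is built by prepending instead of append+reverse)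
import Mathlib
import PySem

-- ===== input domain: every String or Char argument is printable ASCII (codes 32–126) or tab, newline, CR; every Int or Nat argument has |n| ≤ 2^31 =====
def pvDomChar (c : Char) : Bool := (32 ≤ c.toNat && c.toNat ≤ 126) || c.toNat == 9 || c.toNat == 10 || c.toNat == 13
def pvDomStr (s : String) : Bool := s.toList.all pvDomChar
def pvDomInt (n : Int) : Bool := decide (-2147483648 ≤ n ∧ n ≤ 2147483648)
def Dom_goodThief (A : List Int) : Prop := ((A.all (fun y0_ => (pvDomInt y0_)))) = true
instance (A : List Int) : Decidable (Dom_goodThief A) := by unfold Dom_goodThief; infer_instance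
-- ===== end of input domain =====

-- B replaces A's quadratic inner max-scan by a running prefix maximum (one pass).

-- ===== PORT A =====
-- literal transliteration of Source A: dp preallocated as [0]*n and filled by dp[i] = max(A[i]+dp[j] for j in range(i-1));
-- indexing is in range on Pre_ (n ≥ 2), so pyGetD/getD-with-default and .toNat are exact raise-guards here.
def goodThief (A : List Int) : List Int × Int :=
  let n : Int := PySem.List.len A
  -- dp = [0 for _ in range(n)]; dp[0] = A[0]; dp[1] = A[1]  (raises on n < 2, excluded by Pre_)
  let dp0 : List Int :=
    ((List.replicate A.length (0 : Int)).set 0 (PySem.List.pyGetD A 0 0)).set 1 (PySem.List.pyGetD A 1 0)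
  let dp : List Int :=
    (PySem.List.pyRange 2 n 1).foldl (fun dp i =>
      dp.set i.toNat
        ((PySem.List.max? ((PySem.List.pyRange 0 (i - 1) 1).map
          (fun j => PySem.List.pyGetD A i 0 + PySem.List.pyGetD dp j 0)) (fun y => y)).getD 0)) dp0
  let result : Int := (PySem.List.max? dp (fun y => y)).getD 0
  -- for i in range(n-1, -1, -1): if dp[i] == check: road.append(i); check -= A[i]
  let rc : List Int × Int :=
    (PySem.List.pyRange (n - 1) (-1) (-1)).foldl (fun (rc : List Int × Int) i =>
      if PySem.List.pyGetD dp i 0 = rc.2 then (rc.1 ++ [i], rc.2 - PySem.List.pyGetD A i 0) else rc)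
      (([] : List Int), result)
  -- road = road[::-1] is exactly List.reverse
  (rc.1.reverse, result)

-- ===== PORT B =====
-- literal transliteration of Source B: dp grows by append, 'best' is the running max of dp[0..i-2]; road built by prepending.
def goodThief_alt (A : List Int) : List Int × Int :=
  let n : Int := PySem.List.len A
  let s :=
    (PySem.List.pyRange 2 n 1).foldl (fun (s : List Int × Int) i =>
      let dp := s.1 ++ [PySem.List.pyGetD A i 0 + s.2]
      (dp, if PySem.List.pyGetD dp (i - 1) 0 > s.2 then PySem.List.pyGetD dp (i - 1) 0 else s.2))
      ([PySem.List.pyGetD A 0 0, PySem.List.pyGetD A 1 0], PySem.List.pyGetD A 0 0)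
  let dp := s.1
  let result : Int := (PySem.List.max? dp (fun y => y)).getD 0
  let rc : List Int × Int :=
    (PySem.List.pyRange (n - 1) (-1) (-1)).foldl (fun (rc : List Int × Int) i =>
      if PySem.List.pyGetD dp i 0 = rc.2 then (i :: rc.1, rc.2 - PySem.List.pyGetD A i 0) else rc)
      (([] : List Int), result)
  (rc.1, result)

-- ===== PRECONDITION & SPEC =====
-- Pre_ excludes exactly the lists of length < 2, on which A raises IndexError (dp[1] = A[1]).
def Pre_goodThief (A : List Int) : Prop := 2 ≤ A.length
instance (A : List Int) : Decidable (Pre_goodThief A) := by unfold Pre_goodThief; infer_instance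
def pvWitness_goodThief : List Int := ([2, 3, 5] : List Int)

def Spec_goodThief (A : List Int) (out : List Int × Int) : Prop := out = goodThief_alt A
instance (A : List Int) (out : List Int × Int) : Decidable (Spec_goodThief A out) := by unfold Spec_goodThief; infer_instance

-- ===== CLAIM (what is proved, stated in full; the proofs are below) =====
def Claim_equal_goodThief : Prop := ∀ (A : List Int), Dom_goodThief A → Pre_goodThief A → Spec_goodThief A (goodThief A)

-- ===== LEMMAS AND PROOFS =====

-- reference dp state after m loop iterations: (dp list of length m+2, best = max of dp[0..m])
def gRef (A : List Int) : Nat → List Int × Int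
  | 0 => ([A.getD 0 0, A.getD 1 0], A.getD 0 0)
  | m + 1 =>
    let s := gRef A m
    let dp' := s.1 ++ [A.getD (m + 2) 0 + s.2]
    (dp', if dp'.getD (m + 1) 0 > s.2 then dp'.getD (m + 1) 0 else s.2)

theorem gRef_len (A : List Int) (m : Nat) : (gRef A m).1.length = m + 2 := by
  induction m with
  | zero => rfl
  | succ m ih => simp [gRef, ih]

-- running prefix maximum of dp[0..m]
def prefMax (dp : List Int) : Nat → Int
  | 0 => dp.getD 0 0
  | m + 1 => if dp.getD (m + 1) 0 > prefMax dp m then dp.getD (m + 1) 0 else prefMax dp m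

theorem prefMax_congr (dp dp' : List Int) (m : Nat)
    (h : ∀ j, j ≤ m → dp.getD j 0 = dp'.getD j 0) : prefMax dp m = prefMax dp' m := by
  induction m with
  | zero => simpa [prefMax] using h 0 (by omega)
  | succ m ih =>
    have hm := ih (fun j hj => h j (by omega))
    simp only [prefMax, hm, h (m + 1) le_rfl]

theorem gRef_best (A : List Int) (m : Nat) : (gRef A m).2 = prefMax (gRef A m).1 m := by
  induction m with
  | zero => rfl
  | succ m ih =>
    have hpc : prefMax (gRef A m).1 m
        = prefMax ((gRef A m).1 ++ [A.getD (m + 2) 0 + (gRef A m).2]) m := by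
      apply prefMax_congr
      intro j hj
      have hl : j < (gRef A m).1.length := by rw [gRef_len]; omega
      simp [List.getD, List.getElem?_append_left hl]
    simp only [gRef, prefMax]
    rw [← hpc, ← ih]

-- max? over the generator list equals c + prefMax
theorem maxGen (dp : List Int) (c : Int) (m : Nat) :
    ((PySem.List.max? ((PySem.List.pyRange 0 ((m : Int) + 1) 1).map
      (fun j => c + PySem.List.pyGetD dp j 0)) (fun y => y)).getD 0) = c + prefMax dp m := by
  induction m with
  | zero =>
    rw [show ((0 : Nat) : Int) + 1 = 0 + 1 by ring, PySem.List.pyRange_one_singleton]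
    simp [PySem.List.max?_id_cons, prefMax, PySem.List.pyGetD_zero]
  | succ m ih =>
    rw [show ((m + 1 : Nat) : Int) + 1 = ((m : Int) + 1) + 1 by push_cast; ring,
      PySem.List.pyRange_one_succ_right (a := 0) (b := (m : Int) + 1) (by omega)]
    rcases hc : PySem.List.pyRange 0 ((m : Int) + 1) 1 with _ | ⟨x, t⟩
    · exfalso
      have hl := PySem.List.length_pyRange_one 0 ((m : Int) + 1)
      rw [hc] at hl; simp at hl
    · rw [hc] at ih
      simp only [List.map_append, List.map_cons, List.cons_append,
        PySem.List.max?_id_cons, Option.getD_some, List.foldl_append] at ih ⊢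
      simp only [List.map_nil, List.foldl_cons, List.foldl_nil]
      rw [ih]
      have hgd : PySem.List.pyGetD dp ((m : Int) + 1) 0 = dp.getD (m + 1) 0 := by
        rw [show ((m : Int) + 1) = ((m + 1 : Nat) : Int) by push_cast; ring,
          PySem.List.pyGetD_natCast]
      rw [hgd]
      simp only [prefMax]
      split <;> omega

-- B's loop computes gRef
theorem B_inv (A : List Int) (m : Nat) :
    (PySem.List.pyRange 2 (2 + (m : Int)) 1).foldl (fun (s : List Int × Int) i =>
      let dp := s.1 ++ [PySem.List.pyGetD A i 0 + s.2]
      (dp, if PySem.List.pyGetD dp (i - 1) 0 > s.2 then PySem.List.pyGetD dp (i - 1) 0 else s.2))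
      ([PySem.List.pyGetD A 0 0, PySem.List.pyGetD A 1 0], PySem.List.pyGetD A 0 0)
    = gRef A m := by
  induction m with
  | zero =>
    rw [show (2 + ((0 : Nat) : Int)) = 2 by ring, PySem.List.pyRange_one_eq_nil (by omega)]
    simp only [List.foldl_nil, gRef]
    rw [show (0 : Int) = ((0 : Nat) : Int) by norm_num, PySem.List.pyGetD_natCast,
      show (1 : Int) = ((1 : Nat) : Int) by norm_num, PySem.List.pyGetD_natCast]
  | succ m ih =>
    rw [show (2 + ((m + 1 : Nat) : Int)) = (2 + (m : Int)) + 1 by push_cast; ring,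
      PySem.List.pyRange_one_succ_right (a := 2) (b := 2 + (m : Int)) (by omega), List.foldl_append, ih]
    simp only [List.foldl_cons, List.foldl_nil, gRef]
    have hA : PySem.List.pyGetD A (2 + (m : Int)) 0 = A.getD (m + 2) 0 := by
      rw [show (2 + (m : Int)) = ((m + 2 : Nat) : Int) by push_cast; ring,
        PySem.List.pyGetD_natCast]
    have hdp : ∀ (l : List Int),
        PySem.List.pyGetD l (2 + (m : Int) - 1) 0 = l.getD (m + 1) 0 := by
      intro l
      rw [show (2 + (m : Int) - 1) = ((m + 1 : Nat) : Int) by push_cast; ring,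
        PySem.List.pyGetD_natCast]
    simp only [hA, hdp]

-- A's loop computes gRef's dp with the untouched zero tail
theorem A_inv (A : List Int) (h2 : 2 ≤ A.length) (m : Nat) (hm : m ≤ A.length - 2) :
    (PySem.List.pyRange 2 (2 + (m : Int)) 1).foldl (fun dp i =>
      dp.set i.toNat
        ((PySem.List.max? ((PySem.List.pyRange 0 (i - 1) 1).map
          (fun j => PySem.List.pyGetD A i 0 + PySem.List.pyGetD dp j 0)) (fun y => y)).getD 0))
      (((List.replicate A.length (0 : Int)).set 0 (PySem.List.pyGetD A 0 0)).set 1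
        (PySem.List.pyGetD A 1 0))
    = (gRef A m).1 ++ List.replicate (A.length - 2 - m) 0 := by
  induction m with
  | zero =>
    rw [show (2 + ((0 : Nat) : Int)) = 2 by ring, PySem.List.pyRange_one_eq_nil (by omega)]
    simp only [List.foldl_nil]
    obtain ⟨a0, A', rfl⟩ : ∃ a0 A', A = a0 :: A' := by
      cases A with
      | nil => simp at h2
      | cons a t => exact ⟨a, t, rfl⟩
    obtain ⟨a1, A'', rfl⟩ : ∃ a1 A'', A' = a1 :: A'' := by
      cases A' with
      | nil => simp at h2
      | cons a t => exact ⟨a, t, rfl⟩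
    simp only [gRef, List.length_cons, List.replicate_succ, List.set_cons_zero,
      List.set_cons_succ, PySem.List.pyGetD_zero]
    rw [show (1 : Int) = ((1 : Nat) : Int) by norm_num, PySem.List.pyGetD_natCast]
    rfl
  | succ m ih =>
    have hm' : m ≤ A.length - 2 := by omega
    rw [show (2 + ((m + 1 : Nat) : Int)) = (2 + (m : Int)) + 1 by push_cast; ring,
      PySem.List.pyRange_one_succ_right (a := 2) (b := 2 + (m : Int)) (by omega), List.foldl_append, ih hm']
    simp only [List.foldl_cons, List.foldl_nil]
    set dpc := (gRef A m).1 ++ List.replicate (A.length - 2 - m) 0 with hdpc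
    have hA : PySem.List.pyGetD A (2 + (m : Int)) 0 = A.getD (m + 2) 0 := by
      rw [show (2 + (m : Int)) = ((m + 2 : Nat) : Int) by push_cast; ring,
        PySem.List.pyGetD_natCast]
    have hmaxarg : (2 + (m : Int)) - 1 = (m : Int) + 1 := by ring
    have hmax :
        ((PySem.List.max? ((PySem.List.pyRange 0 (2 + (m : Int) - 1) 1).map
          (fun j => PySem.List.pyGetD A (2 + (m : Int)) 0 + PySem.List.pyGetD dpc j 0))
          (fun y => y)).getD 0)
        = A.getD (m + 2) 0 + (gRef A m).2 := by
      rw [hmaxarg, hA, maxGen dpc (A.getD (m + 2) 0) m]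
      congr 1
      rw [gRef_best]
      apply prefMax_congr
      intro j hj
      have hl : j < (gRef A m).1.length := by rw [gRef_len]; omega
      simp [hdpc, List.getD, List.getElem?_append_left hl]
    rw [hmax]
    have htoNat : (2 + (m : Int)).toNat = m + 2 := by omega
    rw [htoNat]
    have hk : A.length - 2 - m = (A.length - 2 - (m + 1)) + 1 := by omega
    rw [hdpc, hk, List.replicate_succ]
    set v := A.getD (m + 2) 0 + (gRef A m).2 with hv
    rw [show (m + 2) = (gRef A m).1.length + 0 from by rw [gRef_len]]
    rw [List.set_append_right _ _ (by omega)]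
    simp only [Nat.add_sub_cancel_left, List.set_cons_zero]
    show (gRef A m).1 ++ v :: List.replicate (A.length - 2 - (m + 1)) 0
      = (gRef A (m + 1)).1 ++ List.replicate (A.length - 2 - (m + 1)) 0
    simp [gRef, hv]

-- road built by appending then reversed = road built by prepending
theorem recon (dp A : List Int) :
    ∀ (L : List Int) (r : List Int) (c : Int),
      L.foldl (fun (rc : List Int × Int) i =>
        if PySem.List.pyGetD dp i 0 = rc.2 then (i :: rc.1, rc.2 - PySem.List.pyGetD A i 0) else rc)
        (r, c)
      = (((L.foldl (fun (rc : List Int × Int) i =>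
          if PySem.List.pyGetD dp i 0 = rc.2 then (rc.1 ++ [i], rc.2 - PySem.List.pyGetD A i 0) else rc)
          (r.reverse, c)).1).reverse,
        (L.foldl (fun (rc : List Int × Int) i =>
          if PySem.List.pyGetD dp i 0 = rc.2 then (rc.1 ++ [i], rc.2 - PySem.List.pyGetD A i 0) else rc)
          (r.reverse, c)).2) := by
  intro L
  induction L with
  | nil => intro r c; simp
  | cons x L ih =>
    intro r c
    simp only [List.foldl_cons]
    by_cases hx : PySem.List.pyGetD dp x 0 = c
    · simp only [hx, if_true]
      have hih := ih (x :: r) (c - PySem.List.pyGetD A x 0)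
      simpa using hih
    · simp only [if_neg hx]
      exact ih r c

-- ===== VERDICT (by name: the statement is the Claim_ definition above) =====
theorem goodThief_spec : Claim_equal_goodThief := by
  intro A hDom hPre
  unfold Spec_goodThief goodThief goodThief_alt
  have h2 : 2 ≤ A.length := hPre
  have hn : PySem.List.len A = 2 + ((A.length - 2 : Nat) : Int) := by
    simp [PySem.List.len_eq]; omega
  rw [hn]
  have hA := A_inv A h2 (A.length - 2) le_rfl
  have hB := B_inv A (A.length - 2)
  simp only [hA, hB, Nat.sub_self, List.replicate_zero, List.append_nil]
  set dp := (gRef A (A.length - 2)).1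
  set result := (PySem.List.max? dp (fun y => y)).getD 0
  rw [recon dp A _ [] result]
  simp
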